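-- pv_equiv track=rewrite | github.com/SebastienBrown/ReportIO | temp/chunking.py | _get_overlap_text
-- ===== SOURCE A (Python) =====
-- def _get_overlap_text(text: str, overlap_size: int) -> str:
--     """Get the last overlap_size characters, preferring sentence boundaries"""
--     if len(text) <= overlap_size:
--         return text
--
--     # Try to find a sentence boundary within the overlap region
--     overlap_start = len(text) - overlap_size
--     overlap_text = text[overlap_start:]
--
--     # Look for sentence ending
--     sentence_ends = ['.', '!', '?']
--     for i, char in enumerate(overlap_text):
--         if char in sentence_ends and i > overlap_size // 2:
--             return overlap_text[i+1:].strip()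
--
--     return overlap_text
-- ===== SOURCE B (Python) =====
-- def _get_overlap_text(text: str, overlap_size: int) -> str:
--     """Get the last overlap_size characters, preferring sentence boundaries"""
--     if len(text) <= overlap_size:
--         return text
--     overlap_text = text[len(text) - overlap_size:]
--     start = overlap_size // 2 + 1
--     positions = [p for p in (overlap_text.find(end, start) for end in ('.', '!', '?')) if p != -1]
--     if positions:
--         return overlap_text[min(positions) + 1:].strip()
--     return overlap_text
-- ===== Notes on version B (the rewrite author's own statement) =====
-- stated objective: faster
-- what changed: Replaces A's character-by-character enumerate loop (per-character list membership test in interpreted Python) with three C-level str.find calls starting just past the midpoint and a min over the hit positions.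
import Mathlib
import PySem

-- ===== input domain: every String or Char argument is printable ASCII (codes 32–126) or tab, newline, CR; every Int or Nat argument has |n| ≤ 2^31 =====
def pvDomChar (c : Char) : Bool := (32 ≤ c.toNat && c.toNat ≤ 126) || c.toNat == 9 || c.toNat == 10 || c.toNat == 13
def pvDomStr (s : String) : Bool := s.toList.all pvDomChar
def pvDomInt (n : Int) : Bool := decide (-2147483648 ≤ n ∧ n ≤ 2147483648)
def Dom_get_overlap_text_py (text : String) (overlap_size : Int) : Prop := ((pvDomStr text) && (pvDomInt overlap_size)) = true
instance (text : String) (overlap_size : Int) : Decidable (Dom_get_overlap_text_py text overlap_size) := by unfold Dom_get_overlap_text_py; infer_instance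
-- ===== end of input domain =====

-- B replaces A's per-character enumerate-scan by three str.find calls starting just past the
-- midpoint and a min over the hit positions (objective: faster; measured).

-- ===== PORT A =====
-- the 'for i, char in enumerate(overlap_text)' loop with its early return
def pvAScan (ot : String) (m : Int) : List (Int × Char) → Option String
  | [] => none
  | (i, c) :: rest =>
      if (c = '.' ∨ c = '!' ∨ c = '?') ∧ m < i then
        some (PySem.Str.strip (PySem.Str.slice ot (some (i + 1)) none))
      else pvAScan ot m rest

def get_overlap_text_py (text : String) (overlap_size : Int) : String :=
  if PySem.Str.len text ≤ overlap_size then text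
  else
    let overlap_text := PySem.Str.slice text (some (PySem.Str.len text - overlap_size)) none
    match pvAScan overlap_text (PySem.Int.floordiv overlap_size 2)
        (PySem.List.enumerate overlap_text.toList 0) with
    | some r => r
    | none => overlap_text

-- ===== PORT B =====
def get_overlap_text_py_alt (text : String) (overlap_size : Int) : String :=
  if PySem.Str.len text ≤ overlap_size then text
  else
    let overlap_text := PySem.Str.slice text (some (PySem.Str.len text - overlap_size)) none
    let start := PySem.Int.floordiv overlap_size 2 + 1
    let positions := ([".", "!", "?"].map
        (fun e => PySem.Str.findFrom overlap_text e start none)).filter (fun p => p ≠ -1)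
    match PySem.List.min? positions (fun p => p) with
    | some j => PySem.Str.strip (PySem.Str.slice overlap_text (some (j + 1)) none)
    | none => overlap_text

-- ===== PRECONDITION & SPEC =====
def Spec_get_overlap_text_py (text : String) (overlap_size : Int) (out : String) : Prop := out = get_overlap_text_py_alt text overlap_size
instance (text : String) (overlap_size : Int) (out : String) : Decidable (Spec_get_overlap_text_py text overlap_size out) := by unfold Spec_get_overlap_text_py; infer_instance

-- ===== CLAIM (what is proved, stated in full; the proofs are below) =====
def Claim_equal_get_overlap_text_py : Prop := ∀ (text : String) (overlap_size : Int), Dom_get_overlap_text_py text overlap_size → Spec_get_overlap_text_py text overlap_size (get_overlap_text_py text overlap_size)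

-- ===== LEMMAS AND PROOFS =====

-- the sentence-ender predicate, Bool form
def pvEnd (c : Char) : Bool := c == '.' || c == '!' || c == '?'

theorem pvAScan_eq (ot : String) (m : Int) (l : List Char) (s : Int) (hs : 0 ≤ s) :
    pvAScan ot m (PySem.List.enumerate l s) =
      ((l.drop (m + 1 - s).toNat).findIdx? pvEnd).map
        (fun j => PySem.Str.strip (PySem.Str.slice ot (some (s + (m + 1 - s).toNat + j + 1)) none)) := by
  induction l generalizing s with
  | nil => simp [pvAScan, PySem.List.enumerate_nil]
  | cons c rest ih =>
    rw [PySem.List.enumerate_cons]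
    by_cases hm : m < s
    · have ht : (m + 1 - s).toNat = 0 := by omega
      have ht' : (m + 1 - (s+1)).toNat = 0 := by omega
      rw [ht]
      by_cases hc : pvEnd c
      · have hc' : (c = '.' ∨ c = '!' ∨ c = '?') := by
          simp [pvEnd] at hc; tauto
        simp only [pvAScan, if_pos (And.intro hc' hm), List.drop_zero, List.findIdx?_cons, hc,
          if_true]
        simp
      · have hc' : ¬ ((c = '.' ∨ c = '!' ∨ c = '?') ∧ m < s) := by
          simp [pvEnd] at hc; exact fun h => absurd h.1 (by tauto)
        simp only [pvAScan, if_neg hc', List.drop_zero, List.findIdx?_cons, hc]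
        rw [ih (s+1) (by omega), ht']
        cases h : (rest.findIdx? pvEnd) with
        | none => simp [h]
        | some j => simp [h]; ring_nf
    · have hc' : ¬ ((c = '.' ∨ c = '!' ∨ c = '?') ∧ m < s) := by tauto
      have ht : (m + 1 - s).toNat = (m + 1 - (s+1)).toNat + 1 := by omega
      simp only [pvAScan, if_neg hc']
      rw [ih (s+1) (by omega), ht, List.drop_succ_cons]
      cases h : ((rest.drop (m + 1 - (s+1)).toNat).findIdx? pvEnd) with
      | none => simp
      | some j => simp; ring_nf

theorem pvFind_single_cons (a : Char) (l : List Char) (c : Char) :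
    PySem.Chars.find (a :: l) [c] =
      if a = c then 0
      else if PySem.Chars.find l [c] = -1 then -1 else PySem.Chars.find l [c] + 1 := by
  by_cases hac : a = c
  · subst hac
    have hinf : [a] <:+: (a :: l) := (List.singleton_infix_iff _ _).2 (by simp)
    have hnn : 0 ≤ PySem.Chars.find (a :: l) [a] :=
      (PySem.Chars.find_nonneg_iff _ _).2 hinf
    obtain ⟨hpre, hmin⟩ := PySem.Chars.find_spec hnn
    rw [if_pos rfl]
    by_contra hne0
    have hpos : 0 < (PySem.Chars.find (a :: l) [a]).toNat := by omega
    exact hmin 0 hpos (by simp)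
  · rw [if_neg hac]
    by_cases hl : PySem.Chars.find l [c] = -1
    · rw [if_pos hl]
      have hni : ¬ [c] <:+: l := (PySem.Chars.find_eq_neg_one_iff _ _).1 hl
      rw [List.singleton_infix_iff] at hni
      have hnotin : ¬ [c] <:+: (a :: l) := by
        rw [List.singleton_infix_iff]
        intro h
        rcases List.mem_cons.1 h with h' | h'
        · exact hac h'.symm
        · exact hni h'
      exact (PySem.Chars.find_eq_neg_one_iff _ _).2 hnotin
    · rw [if_neg hl]
      have hnnl : 0 ≤ PySem.Chars.find l [c] := by
        have := PySem.Chars.neg_one_le_find l [c]; omega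
      obtain ⟨hprel, hminl⟩ := PySem.Chars.find_spec hnnl
      have hinf : [c] <:+: (a :: l) := by
        rw [List.singleton_infix_iff]
        have hm : c ∈ List.drop (PySem.Chars.find l [c]).toNat l := hprel.mem (by simp)
        exact List.mem_cons_of_mem a (List.mem_of_mem_drop hm)
      have hnn : 0 ≤ PySem.Chars.find (a :: l) [c] := (PySem.Chars.find_nonneg_iff _ _).2 hinf
      obtain ⟨hpre, hmin⟩ := PySem.Chars.find_spec hnn
      set f := PySem.Chars.find (a :: l) [c] with hf
      set g := PySem.Chars.find l [c] with hg
      have hub : f.toNat ≤ g.toNat + 1 := by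
        by_contra hgt
        exact hmin (g.toNat + 1) (by omega) (by simpa using hprel)
      have hf0 : f.toNat ≠ 0 := by
        intro h0
        rw [h0] at hpre
        simp at hpre
        exact hac hpre.symm
      have hlb : g.toNat + 1 ≤ f.toNat := by
        by_contra hlt
        have hflt : f.toNat - 1 < g.toNat := by omega
        have hp : [c] <+: l.drop (f.toNat - 1) := by
          have hd : (a :: l).drop f.toNat = l.drop (f.toNat - 1) := by
            rcases Nat.exists_eq_succ_of_ne_zero hf0 with ⟨k, hk⟩
            simp [hk]
          rwa [hd] at hpre
        exact hminl (f.toNat - 1) hflt hp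
      omega

theorem pvFind_single (l : List Char) (c : Char) :
    PySem.Chars.find l [c] =
      match l.findIdx? (· == c) with
      | some j => (j : Int)
      | none => -1 := by
  induction l with
  | nil =>
    have hni : ¬ [c] <:+: ([] : List Char) := by simp
    simp [(PySem.Chars.find_eq_neg_one_iff _ _).2 hni]
  | cons a l ih =>
    rw [pvFind_single_cons, List.findIdx?_cons]
    by_cases hac : a = c
    · simp [hac]
    · have hb : (a == c) = false := beq_eq_false_iff_ne.2 hac
      rw [if_neg hac, ih]
      cases h : l.findIdx? (· == c) with
      | none => simp [hb]
      | some j => simp [hb]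

theorem pvMinAux (ys : List Int) (y v : Int) (hv : v ∈ y :: ys)
    (hb : ∀ x ∈ y :: ys, v ≤ x) :
    PySem.List.min? (y :: ys) (fun p => p) = some v := by
  induction ys generalizing y with
  | nil => simp [PySem.List.min?] ; simpa using (List.mem_singleton.1 hv).symm
  | cons z ys ih =>
    have hstep : PySem.List.min? (y :: z :: ys) (fun p => p)
        = PySem.List.min? (min y z :: ys) (fun p => p) := by
      by_cases h : z < y
      · have hm : min y z = z := by omega
        simp [PySem.List.min?, List.foldl_cons, h, hm]
      · have hm : min y z = y := by omega
        simp [PySem.List.min?, List.foldl_cons, h, hm]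
    rw [hstep]
    apply ih
    · rcases List.mem_cons.1 hv with h | h
      · have hm : min y z = v := by subst h; have := hb z (by simp); omega
        simp [hm]
      · rcases List.mem_cons.1 h with h' | h'
        · have hm : min y z = v := by subst h'; have := hb y (by simp); omega
          simp [hm]
        · exact List.mem_cons_of_mem _ h'
    · intro x hx
      rcases List.mem_cons.1 hx with h | h
      · subst h
        have h1 := hb y (by simp); have h2 := hb z (by simp); omega
      · exact hb x (by simp [h])

theorem pvMin?_eq (xs : List Int) (v : Int) (hv : v ∈ xs) (hb : ∀ x ∈ xs, v ≤ x) :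
    PySem.List.min? xs (fun p => p) = some v := by
  cases xs with
  | nil => simp at hv
  | cons y ys => exact pvMinAux ys y v hv hb

theorem pvTri (l : List Char) (k : Int) (hk : 0 ≤ k) :
    PySem.List.min? (([('.' : Char), '!', '?'].map
        (fun c => match l.findIdx? (· == c) with
                  | some j => k + (j : Int)
                  | none => (-1 : Int))).filter (fun p => p ≠ -1)) (fun p => p) =
      (l.findIdx? pvEnd).map (fun j => k + (j : Int)) := by
  induction l generalizing k with
  | nil => simp [PySem.List.min?, List.findIdx?_nil]
  | cons c0 rest ih =>
    by_cases hce : pvEnd c0 = true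
    · have hc0 : c0 = '.' ∨ c0 = '!' ∨ c0 = '?' := by simp [pvEnd] at hce; tauto
      have hmem : k ∈ ([('.' : Char), '!', '?'].map
          (fun c => match (c0 :: rest).findIdx? (· == c) with
                    | some j => k + (j : Int)
                    | none => (-1 : Int))).filter (fun p => p ≠ -1) := by
        apply List.mem_filter.2
        constructor
        · apply List.mem_map.2
          refine ⟨c0, by rcases hc0 with h|h|h <;> simp [h], ?_⟩
          rw [List.findIdx?_cons, if_pos (by simp)]
          simp
        · simp; omega
      have hbound : ∀ x ∈ ([('.' : Char), '!', '?'].map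
          (fun c => match (c0 :: rest).findIdx? (· == c) with
                    | some j => k + (j : Int)
                    | none => (-1 : Int))).filter (fun p => p ≠ -1), k ≤ x := by
        intro x hx
        obtain ⟨c, _, hFc⟩ := List.mem_map.1 (List.mem_filter.1 hx).1
        have hne := (List.mem_filter.1 hx).2
        rw [← hFc]
        rw [← hFc] at hne
        cases h : (c0 :: rest).findIdx? (· == c) with
        | none => rw [h] at hne; simp at hne
        | some j => simp
      rw [List.findIdx?_cons, hce, if_pos rfl, pvMin?_eq _ k hmem hbound]
      simp
    · have hce' : pvEnd c0 = false := by simpa using hce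
      have hb : ∀ c : Char, pvEnd c = true → (c0 == c) = false := by
        intro c hc
        refine beq_eq_false_iff_ne.2 fun hq => ?_
        rw [hq, hc] at hce'
        simp at hce'
      have hF : ∀ c : Char, pvEnd c = true →
          (match (c0 :: rest).findIdx? (· == c) with
           | some j => k + (j : Int)
           | none => (-1 : Int)) =
          (match rest.findIdx? (· == c) with
           | some j => (k + 1) + (j : Int)
           | none => (-1 : Int)) := by
        intro c hc
        simp only [List.findIdx?_cons, hb c hc, Bool.false_eq_true, if_false]
        cases h : rest.findIdx? (· == c) with
        | none => simp
        | some j => simp; ring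
      simp only [List.map_cons, List.map_nil]
      rw [hF '.' (by simp [pvEnd]), hF '!' (by simp [pvEnd]), hF '?' (by simp [pvEnd])]
      have hih := ih (k + 1) (by omega)
      simp only [List.map_cons, List.map_nil] at hih
      rw [hih]
      simp only [List.findIdx?_cons, hce', Bool.false_eq_true, if_false]
      cases h : rest.findIdx? pvEnd with
      | none => simp
      | some j => simp; ring

theorem pvFindFrom_nil (sub : List Char) (hsub : sub ≠ []) (st : Int) :
    PySem.Chars.findFrom [] sub st none = -1 := by
  have hfind : PySem.Chars.find ([] : List Char) sub = -1 :=
    (PySem.Chars.find_eq_neg_one_iff _ _).2 (by rw [List.infix_nil]; exact hsub)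
  unfold PySem.Chars.findFrom
  simp only [List.length_nil, Nat.cast_zero]
  split_ifs <;> simp_all

theorem pvG (l' : List Char) (c : Char) (k : Int) :
    (if PySem.Chars.find l' [c] = -1 then -1 else k + PySem.Chars.find l' [c]) =
      (match l'.findIdx? (· == c) with
       | some j => k + (j : Int)
       | none => (-1 : Int)) := by
  rw [pvFind_single]
  cases h : l'.findIdx? (· == c) with
  | none => simp
  | some j => simp

-- ===== VERDICT (by name: the statement is the Claim_ definition above) =====
theorem get_overlap_text_py_spec : Claim_equal_get_overlap_text_py := by
  intro text osz _
  unfold Spec_get_overlap_text_py get_overlap_text_py get_overlap_text_py_alt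
  by_cases hle : PySem.Str.len text ≤ osz
  · rw [if_pos hle, if_pos hle]
  · simp only [if_neg hle]
    set ot := PySem.Str.slice text (some (PySem.Str.len text - osz)) none with hot
    have hlen : PySem.Str.len text = (text.toList.length : Int) := PySem.Str.len_eq text
    have hoz : osz < (text.toList.length : Int) := by omega
    have hdrop : PySem.List.slice text.toList (some ((text.toList.length : Int) - osz)) none
        = text.toList.drop ((text.toList.length : Int) - osz).toNat :=
      PySem.List.slice_from text.toList (by omega)
    have hotl : ot.toList = text.toList.drop ((text.toList.length : Int) - osz).toNat := by
      rw [hot, PySem.Str.toList_slice, hlen]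
      exact hdrop
    by_cases hpos : 0 < osz
    · -- main case: the overlap region is the last osz characters
      have hm : PySem.Int.floordiv osz 2 = ((osz.toNat / 2 : Nat) : Int) := by
        unfold PySem.Int.floordiv; rw [Int.fdiv_eq_ediv]; omega
      have hlenl : ot.toList.length = osz.toNat := by
        rw [hotl, List.length_drop]; omega
      have hkl : osz.toNat / 2 + 1 ≤ ot.toList.length := by rw [hlenl]; omega
      have hkt : (PySem.Int.floordiv osz 2 + 1 - 0).toNat = osz.toNat / 2 + 1 := by
        rw [hm]; omega
      have hk' : PySem.Int.floordiv osz 2 + 1 = ((osz.toNat / 2 + 1 : Nat) : Int) := by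
        rw [hm]; push_cast; ring
      rw [pvAScan_eq ot (PySem.Int.floordiv osz 2) ot.toList 0 (by rfl), hkt]
      have hff : ∀ e : String, PySem.Str.findFrom ot e (PySem.Int.floordiv osz 2 + 1) none =
          PySem.Chars.findFrom ot.toList e.toList ((osz.toNat / 2 + 1 : Nat) : Int) none := by
        intro e; rw [PySem.Str.findFrom_eq, hk']
      simp only [List.map_cons, List.map_nil, hff]
      rw [PySem.Chars.findFrom_natCast _ _ _ hkl, PySem.Chars.findFrom_natCast _ _ _ hkl,
        PySem.Chars.findFrom_natCast _ _ _ hkl]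
      have htl1 : ("." : String).toList = ['.'] := rfl
      have htl2 : ("!" : String).toList = ['!'] := rfl
      have htl3 : ("?" : String).toList = ['?'] := rfl
      rw [htl1, htl2, htl3]
      rw [pvG _ '.' _, pvG _ '!' _, pvG _ '?' _]
      have htri := pvTri (ot.toList.drop (osz.toNat / 2 + 1)) ((osz.toNat / 2 + 1 : Nat) : Int) (by positivity)
      simp only [List.map_cons, List.map_nil] at htri
      rw [htri]
      cases h : (ot.toList.drop (osz.toNat / 2 + 1)).findIdx? pvEnd with
      | none => simp
      | some j => simp
    · -- osz ≤ 0 : the overlap slice is empty, both sides return it unchanged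
      have hnil : ot.toList = [] := by
        rw [hotl]
        apply List.drop_eq_nil_of_le; omega
      have hffn : ∀ e : String, e.toList ≠ [] →
          PySem.Str.findFrom ot e (PySem.Int.floordiv osz 2 + 1) none = -1 := by
        intro e he
        rw [PySem.Str.findFrom_eq, hnil, pvFindFrom_nil _ he]
      rw [hnil]
      simp only [PySem.List.enumerate_nil]
      simp only [List.map_cons, List.map_nil, hffn "." (by decide), hffn "!" (by decide),
        hffn "?" (by decide)]
      simp [pvAScan, PySem.List.min?]
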